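-- pv_equiv track=rewrite | github.com/limapiraju/psychopy-em-portugues | Aula 077 – Alpha Span Task/alpha-span-task.py | compute_alpha_score
-- ===== SOURCE A (Python) =====
-- def compute_alpha_score(response, correct):
--     """
--     Calcula o 'alpha score' (Craik, 1986; Craik et al., 2018).
--
--     response : lista de strings
--         Resposta do participante (ex: ["Bed", "Hall", "Milk", "Queen", "Rose", "Stick"])
--     correct : lista de strings
--         Sequência correta em ordem alfabética (ex: ["Bed", "Hall", "Milk", "Queen", "Rose", "Stick"])
--     """
--
--     score = 0
--     used = set()  # armazena quais palavras já receberam ponto (cada palavra só pode pontuar 1x)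
--
--     # 1. Pontuar pares corretos
--     # -------------------------
--     # Para cada par consecutivo no gabarito (ex: Bed-Hall, Hall-Milk, Milk-Queen...)
--     # verificamos se esse par aparece na resposta, na mesma ordem.
--     for i in range(len(correct) - 1):
--         pair = (correct[i], correct[i+1])  # par do gabarito
--
--         # percorre a resposta procurando se o par aparece na ordem correta
--         for j in range(len(response) - 1):
--             if response[j] == pair[0] and response[j + 1] == pair[1]:
--                 # Se a primeira palavra do par ainda não recebeu ponto, marca +1
--                 if response[j] not in used:
--                     used.add(response[j])
--                     score += 1
--
--                 # Se a segunda palavra do par ainda não recebeu ponto, marca +1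
--                 if response[j+1] not in used:
--                     used.add(response[j+1])
--                     score += 1
--
--     # 2. Pontuar o primeiro item correto
--     # ----------------------------------
--     # Se o participante deu a resposta começando com a primeira palavra do gabarito,
--     # e essa palavra ainda não ganhou ponto via pares, então soma +1.
--     if response and response[0] == correct[0] and response[0] not in used:
--         used.add(response[0])
--         score += 1
--
--     # 3. Pontuar o último item correto
--     # --------------------------------
--     # Se a resposta termina com a última palavra do gabarito,
--     # e essa palavra ainda não ganhou ponto via pares, então soma +1.
--     if response and response[-1] == correct[-1] and response[-1] not in used:
--         used.add(response[-1])
--         score += 1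
--
--     return score
-- ===== SOURCE B (Python) =====
-- def compute_alpha_score(response, correct):
--     # Index the answer key's consecutive pairs once, then slide over the
--     # response's consecutive pairs in ONE pass, collecting scored words in a
--     # set; the score is the number of distinct scored words.
--     pairs = set(zip(correct, correct[1:]))
--     used = set()
--     for a, b in zip(response, response[1:]):
--         if (a, b) in pairs:
--             used.add(a)
--             used.add(b)
--     if response and response[0] == correct[0]:
--         used.add(response[0])
--     if response and response[-1] == correct[-1]:
--         used.add(response[-1])
--     return len(used)
-- ===== Notes on version B (the rewrite author's own statement) =====
-- stated objective: faster
-- what changed: Replaces the nested index scan (each correct pair searched through response) by a set of zipped correct pairs plus a single zip pass over the response's adjacent pairs, and replaces the running score counter by len(used), which the counter always equals.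
import Mathlib
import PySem

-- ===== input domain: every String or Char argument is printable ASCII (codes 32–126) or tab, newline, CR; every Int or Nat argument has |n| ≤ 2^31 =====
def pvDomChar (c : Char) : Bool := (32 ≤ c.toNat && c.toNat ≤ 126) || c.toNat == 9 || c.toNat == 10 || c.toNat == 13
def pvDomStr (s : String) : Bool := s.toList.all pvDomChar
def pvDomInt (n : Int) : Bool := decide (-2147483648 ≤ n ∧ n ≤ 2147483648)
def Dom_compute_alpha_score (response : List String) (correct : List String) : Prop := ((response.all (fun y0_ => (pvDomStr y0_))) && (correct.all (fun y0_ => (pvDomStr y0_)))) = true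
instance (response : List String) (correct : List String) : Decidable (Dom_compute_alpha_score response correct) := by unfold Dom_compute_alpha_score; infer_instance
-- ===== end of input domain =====

-- B indexes the zipped correct pairs in a set and slides once over the response's zipped adjacent pairs, returning the size of the scored-word set; proved equal to A's nested index scan with its running counter.


-- ===== PORT A =====
-- indexing helper: response[j] / correct[i] (indices are always in range where used inside Pre_)
def pvGet (xs : List String) (i : Int) : String := PySem.List.pyGetD xs i ""

-- 'if w not in used: used.add(w); score += 1'
def pvScoreWord (st : Int × PySem.Set String) (w : String) : Int × PySem.Set String :=
  if PySem.Set.contains st.2 w then st else (st.1 + 1, PySem.Set.add st.2 w)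

def compute_alpha_score (response : List String) (correct : List String) : Int :=
  let st0 : Int × PySem.Set String := (0, PySem.Set.empty)
  let st1 := (PySem.List.pyRange 0 ((correct.length : Int) - 1) 1).foldl
    (fun st i =>
      let p1 := pvGet correct i
      let p2 := pvGet correct (i + 1)
      (PySem.List.pyRange 0 ((response.length : Int) - 1) 1).foldl
        (fun st j =>
          if pvGet response j = p1 ∧ pvGet response (j + 1) = p2 then
            pvScoreWord (pvScoreWord st (pvGet response j)) (pvGet response (j + 1))
          else st) st) st0
  let st2 := if response ≠ [] ∧ pvGet response 0 = pvGet correct 0 then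
      pvScoreWord st1 (pvGet response 0) else st1
  let st3 := if response ≠ [] ∧ pvGet response (-1) = pvGet correct (-1) then
      pvScoreWord st2 (pvGet response (-1)) else st2
  st3.1

-- ===== PORT B =====
-- zip(xs, xs[1:]): the list of adjacent pairs of xs
def pvAdjPairs (xs : List String) : List (String × String) := xs.zip xs.tail

def compute_alpha_score_alt (response : List String) (correct : List String) : Int :=
  let pairs : PySem.Set (String × String) := PySem.Set.ofList (pvAdjPairs correct)
  let used1 : PySem.Set String := (pvAdjPairs response).foldl
    (fun u p => if PySem.Set.contains pairs p then
        PySem.Set.add (PySem.Set.add u p.1) p.2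
      else u) PySem.Set.empty
  let used2 := match response with
    | [] => used1
    | r :: _ => if r = correct.headD "" then PySem.Set.add used1 r else used1
  let used3 := match response with
    | [] => used2
    | _ :: _ => if response.getLastD "" = correct.getLastD "" then
        PySem.Set.add used2 (response.getLastD "") else used2
  (used3.length : Int)

-- ===== PRECONDITION & SPEC =====
-- Pre_ excludes only the inputs where both programs raise IndexError: a nonempty
-- response against an empty correct list (correct[0] / correct[-1] is indexed).
def Pre_compute_alpha_score (response : List String) (correct : List String) : Prop :=
  response = [] ∨ correct ≠ []
instance (response : List String) (correct : List String) : Decidable (Pre_compute_alpha_score response correct) := by unfold Pre_compute_alpha_score; infer_instance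
def pvWitness_compute_alpha_score : List String × List String := (["Bed", "Milk", "Hall"], ["Bed", "Hall", "Milk"])

def Spec_compute_alpha_score (response : List String) (correct : List String) (out : Int) : Prop := out = compute_alpha_score_alt response correct
instance (response : List String) (correct : List String) (out : Int) : Decidable (Spec_compute_alpha_score response correct out) := by unfold Spec_compute_alpha_score; infer_instance

-- ===== CLAIM (what is proved, stated in full; the proofs are below) =====
def Claim_equal_compute_alpha_score : Prop := ∀ (response : List String) (correct : List String), Dom_compute_alpha_score response correct → Pre_compute_alpha_score response correct → Spec_compute_alpha_score response correct (compute_alpha_score response correct)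

-- ===== LEMMAS AND PROOFS =====

-- zip(xs, xs[1:]) is the per-index pair list A scans by hand
lemma adjPairs_eq_map_pyRange (xs : List String) :
    pvAdjPairs xs = (PySem.List.pyRange 0 ((xs.length : Int) - 1) 1).map
      (fun i => (pvGet xs i, pvGet xs (i + 1))) := by
  apply List.ext_getElem
  · simp only [pvAdjPairs, List.length_zip, List.length_tail, List.length_map,
      PySem.List.length_pyRange_one]
    omega
  · intro k h1 h2
    have hk : k < xs.length - 1 := by
      simpa [pvAdjPairs] using h1
    have hket : k + 1 < xs.length := by omega
    rw [List.getElem_map, PySem.List.getElem_pyRange_one]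
    simp only [pvAdjPairs, List.getElem_zip]
    have h0 : (0 : Int) + (k : Int) = ((k : Nat) : Int) := by omega
    have h1' : ((k : Nat) : Int) + 1 = (((k + 1) : Nat) : Int) := by omega
    rw [h0, h1']
    simp only [pvGet, PySem.List.pyGetD_natCast]
    rw [List.getD_eq_getElem _ _ (show k < xs.length by omega),
      List.getD_eq_getElem _ _ hket]
    simp [List.getElem_tail]

lemma mem_scoreWord (st : Int × PySem.Set String) (x w : String) :
    w ∈ (pvScoreWord st x).2 ↔ w ∈ st.2 ∨ w = x := by
  unfold pvScoreWord
  split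
  · rename_i h
    rw [PySem.Set.contains_iff] at h
    constructor
    · exact fun hw => Or.inl hw
    · rintro (hw | rfl) <;> [exact hw; exact h]
  · simp [PySem.Set.mem_add]

lemma inv_scoreWord (st : Int × PySem.Set String) (x : String)
    (h : st.2.Nodup ∧ st.1 = (st.2.length : Int)) :
    (pvScoreWord st x).2.Nodup ∧ (pvScoreWord st x).1 = ((pvScoreWord st x).2.length : Int) := by
  unfold pvScoreWord
  split
  · exact h
  · rename_i hc
    rw [PySem.Set.contains_iff] at hc
    rw [PySem.Set.add_of_not_mem hc]
    refine ⟨?_, ?_⟩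
    · simpa using List.Nodup.append h.1 (List.nodup_singleton x) (by simpa using hc)
    · simp [h.2]

-- score = |used| and used.Nodup, through any fold whose step preserves it
lemma foldl_pair_inv {α : Type} (step : (Int × PySem.Set String) → α → (Int × PySem.Set String))
    (h : ∀ st x, st.2.Nodup ∧ st.1 = (st.2.length : Int) →
      (step st x).2.Nodup ∧ (step st x).1 = ((step st x).2.length : Int)) :
    ∀ (L : List α) (st : Int × PySem.Set String),
      st.2.Nodup ∧ st.1 = (st.2.length : Int) →
      (L.foldl step st).2.Nodup ∧ (L.foldl step st).1 = ((L.foldl step st).2.length : Int) := by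
  intro L
  induction L with
  | nil => intro st hst; exact hst
  | cons a L ih => intro st hst; exact ih _ (h st a hst)

-- membership in the used-set component of a pair-state fold
lemma foldl_pair_mem {α : Type} (step : (Int × PySem.Set String) → α → (Int × PySem.Set String))
    (q : α → String → Prop)
    (h : ∀ st x w, w ∈ (step st x).2 ↔ w ∈ st.2 ∨ q x w) :
    ∀ (L : List α) (st : Int × PySem.Set String) (w : String),
      w ∈ (L.foldl step st).2 ↔ w ∈ st.2 ∨ ∃ x ∈ L, q x w := by
  intro L
  induction L with
  | nil => simp
  | cons a L ih =>
    intro st w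
    simp only [List.foldl_cons, ih, h, List.mem_cons]
    constructor
    · rintro ((hw | hq) | ⟨x, hx, hq⟩)
      · exact Or.inl hw
      · exact Or.inr ⟨a, Or.inl rfl, hq⟩
      · exact Or.inr ⟨x, Or.inr hx, hq⟩
    · rintro (hw | ⟨x, (rfl | hx), hq⟩)
      · exact Or.inl (Or.inl hw)
      · exact Or.inl (Or.inr hq)
      · exact Or.inr ⟨x, hx, hq⟩

-- membership in a plain set fold (B's loop)
lemma foldl_set_mem {α : Type} (step : PySem.Set String → α → PySem.Set String)
    (q : α → String → Prop)
    (h : ∀ s x w, w ∈ step s x ↔ w ∈ s ∨ q x w) :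
    ∀ (L : List α) (s : PySem.Set String) (w : String),
      w ∈ L.foldl step s ↔ w ∈ s ∨ ∃ x ∈ L, q x w := by
  intro L
  induction L with
  | nil => simp
  | cons a L ih =>
    intro s w
    simp only [List.foldl_cons, ih, h, List.mem_cons]
    constructor
    · rintro ((hw | hq) | ⟨x, hx, hq⟩)
      · exact Or.inl hw
      · exact Or.inr ⟨a, Or.inl rfl, hq⟩
      · exact Or.inr ⟨x, Or.inr hx, hq⟩
    · rintro (hw | ⟨x, (rfl | hx), hq⟩)
      · exact Or.inl (Or.inl hw)
      · exact Or.inl (Or.inr hq)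
      · exact Or.inr ⟨x, hx, hq⟩

lemma foldl_set_nodup {α : Type} (step : PySem.Set String → α → PySem.Set String)
    (h : ∀ s x, s.Nodup → (step s x).Nodup) :
    ∀ (L : List α) (s : PySem.Set String), s.Nodup → (L.foldl step s).Nodup := by
  intro L
  induction L with
  | nil => intro s hs; exact hs
  | cons a L ih => intro s hs; exact ih _ (h s a hs)

-- proof-side bundle: A's running state and B's set agree and carry the invariant
def pvGood (st : Int × PySem.Set String) (u : PySem.Set String) : Prop :=
  (st.2.Nodup ∧ st.1 = (st.2.length : Int)) ∧ u.Nodup ∧ ∀ w, w ∈ st.2 ↔ w ∈ u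

lemma good_scoreWord (st : Int × PySem.Set String) (u : PySem.Set String) (x : String)
    (h : pvGood st u) : pvGood (pvScoreWord st x) (PySem.Set.add u x) := by
  obtain ⟨hst, hu, hm⟩ := h
  refine ⟨inv_scoreWord st x hst, PySem.Set.nodup_add _ _ hu, fun w => ?_⟩
  rw [mem_scoreWord, PySem.Set.mem_add, hm w]

lemma len_eq_of_mem_iff (s t : List String) (hs : s.Nodup) (ht : t.Nodup)
    (h : ∀ w, w ∈ s ↔ w ∈ t) : s.length = t.length :=
  ((List.perm_ext_iff_of_nodup hs ht).mpr h).length_eq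

lemma good_len (st : Int × PySem.Set String) (u : PySem.Set String)
    (h : pvGood st u) : st.1 = (u.length : Int) := by
  obtain ⟨hst, hu, hm⟩ := h
  rw [hst.2]
  exact_mod_cast len_eq_of_mem_iff _ _ hst.1 hu hm

-- ===== VERDICT (by name: the statement is the Claim_ definition above) =====
theorem compute_alpha_score_spec : Claim_equal_compute_alpha_score := by
  intro response correct _ hpre
  simp only [Spec_compute_alpha_score, compute_alpha_score, compute_alpha_score_alt]
  rw [adjPairs_eq_map_pyRange correct, adjPairs_eq_map_pyRange response, List.foldl_map]
  set rC := PySem.List.pyRange 0 ((correct.length : Int) - 1) 1 with hrC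
  set rR := PySem.List.pyRange 0 ((response.length : Int) - 1) 1 with hrR
  -- A's nested loop, membership characterisation
  have hA := foldl_pair_mem
    (fun st i => rR.foldl (fun st j =>
        if pvGet response j = pvGet correct i ∧ pvGet response (j + 1) = pvGet correct (i + 1) then
          pvScoreWord (pvScoreWord st (pvGet response j)) (pvGet response (j + 1))
        else st) st)
    (fun i w => ∃ j ∈ rR, (pvGet response j = pvGet correct i ∧ pvGet response (j + 1) = pvGet correct (i + 1)) ∧ (w = pvGet response j ∨ w = pvGet response (j + 1)))
    (fun st i w => by
      have hin := foldl_pair_mem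
        (fun st j =>
          if pvGet response j = pvGet correct i ∧ pvGet response (j + 1) = pvGet correct (i + 1) then
            pvScoreWord (pvScoreWord st (pvGet response j)) (pvGet response (j + 1))
          else st)
        (fun j w => (pvGet response j = pvGet correct i ∧ pvGet response (j + 1) = pvGet correct (i + 1)) ∧ (w = pvGet response j ∨ w = pvGet response (j + 1)))
        (fun st j w => by
          dsimp only
          split
          · rename_i hc
            simp only [mem_scoreWord]
            tauto
          · tauto)
        rR st w
      exact hin)
    rC ((0 : Int), PySem.Set.empty)
  -- A's nested loop, score/nodup invariant
  have hAinv := foldl_pair_inv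
    (fun st i => rR.foldl (fun st j =>
        if pvGet response j = pvGet correct i ∧ pvGet response (j + 1) = pvGet correct (i + 1) then
          pvScoreWord (pvScoreWord st (pvGet response j)) (pvGet response (j + 1))
        else st) st)
    (fun st i hst => by
      refine foldl_pair_inv _ (fun st j hst => ?_) rR st hst
      dsimp only
      split
      · exact inv_scoreWord _ _ (inv_scoreWord _ _ hst)
      · exact hst)
    rC ((0 : Int), PySem.Set.empty) (by simp [PySem.Set.empty])
  -- B's pair set: membership test unfolded
  have hcont : ∀ a b : String,
      PySem.Set.contains (PySem.Set.ofList (rC.map (fun i => (pvGet correct i, pvGet correct (i + 1))))) (a, b) = true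
        ↔ ∃ i ∈ rC, pvGet correct i = a ∧ pvGet correct (i + 1) = b := by
    intro a b
    rw [PySem.Set.contains_iff, PySem.Set.mem_ofList, List.mem_map]
    constructor
    · rintro ⟨i, hi, heq⟩
      exact ⟨i, hi, congrArg Prod.fst heq, congrArg Prod.snd heq⟩
    · rintro ⟨i, hi, h1, h2⟩
      exact ⟨i, hi, by rw [h1, h2]⟩
  -- B's single pass, membership characterisation
  have hB := foldl_set_mem
    (fun u j =>
      if PySem.Set.contains (PySem.Set.ofList (rC.map (fun i => (pvGet correct i, pvGet correct (i + 1))))) (pvGet response j, pvGet response (j + 1)) = true then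
        PySem.Set.add (PySem.Set.add u (pvGet response j)) (pvGet response (j + 1))
      else u)
    (fun j w => (∃ i ∈ rC, pvGet correct i = pvGet response j ∧ pvGet correct (i + 1) = pvGet response (j + 1)) ∧ (w = pvGet response j ∨ w = pvGet response (j + 1)))
    (fun u j w => by
      dsimp only
      split
      · rename_i hc
        rw [hcont] at hc
        simp only [PySem.Set.mem_add]
        tauto
      · rename_i hc
        rw [hcont] at hc
        exact ⟨fun h => Or.inl h, fun h => h.resolve_right (fun hh => hc hh.1)⟩)
    rR PySem.Set.empty
  -- B's single pass, nodup
  have hBnd := foldl_set_nodup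
    (fun u j =>
      if PySem.Set.contains (PySem.Set.ofList (rC.map (fun i => (pvGet correct i, pvGet correct (i + 1))))) (pvGet response j, pvGet response (j + 1)) = true then
        PySem.Set.add (PySem.Set.add u (pvGet response j)) (pvGet response (j + 1))
      else u)
    (fun u j hu => by
      dsimp only
      split
      · exact PySem.Set.nodup_add _ _ (PySem.Set.nodup_add _ _ hu)
      · exact hu)
    rR PySem.Set.empty (by simp [PySem.Set.empty])
  -- the two loop results contain the same words
  have hmem : ∀ w,
      w ∈ (rC.foldl (fun st i => rR.foldl (fun st j =>
          if pvGet response j = pvGet correct i ∧ pvGet response (j + 1) = pvGet correct (i + 1) then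
            pvScoreWord (pvScoreWord st (pvGet response j)) (pvGet response (j + 1))
          else st) st) ((0 : Int), PySem.Set.empty)).2
        ↔ w ∈ rR.foldl (fun u j =>
          if PySem.Set.contains (PySem.Set.ofList (rC.map (fun i => (pvGet correct i, pvGet correct (i + 1))))) (pvGet response j, pvGet response (j + 1)) = true then
            PySem.Set.add (PySem.Set.add u (pvGet response j)) (pvGet response (j + 1))
          else u) PySem.Set.empty := by
    intro w
    rw [hA w, hB w]
    simp only [PySem.Set.empty, List.not_mem_nil, false_or]
    constructor
    · rintro ⟨i, hi, j, hj, ⟨h1, h2⟩, hw⟩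
      exact ⟨j, hj, ⟨i, hi, h1.symm, h2.symm⟩, hw⟩
    · rintro ⟨j, hj, ⟨i, hi, h1, h2⟩, hw⟩
      exact ⟨i, hi, j, hj, ⟨h1.symm, h2.symm⟩, hw⟩
  have hgood0 : pvGood
      (rC.foldl (fun st i => rR.foldl (fun st j =>
          if pvGet response j = pvGet correct i ∧ pvGet response (j + 1) = pvGet correct (i + 1) then
            pvScoreWord (pvScoreWord st (pvGet response j)) (pvGet response (j + 1))
          else st) st) ((0 : Int), PySem.Set.empty))
      (rR.foldl (fun u j =>
          if PySem.Set.contains (PySem.Set.ofList (rC.map (fun i => (pvGet correct i, pvGet correct (i + 1))))) (pvGet response j, pvGet response (j + 1)) = true then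
            PySem.Set.add (PySem.Set.add u (pvGet response j)) (pvGet response (j + 1))
          else u) PySem.Set.empty) := ⟨hAinv, hBnd, hmem⟩
  -- push through the two endpoint checks: A's if-conditions and B's matches coincide
  clear hA hB hAinv hBnd hmem
  cases response with
  | nil =>
    simp only [ne_eq, not_true_eq_false, false_and, if_false]
    exact good_len _ _ hgood0
  | cons r rs =>
    obtain hc0 : correct ≠ [] := by
      rcases hpre with h | h
      · exact absurd h (by simp)
      · exact h
    obtain ⟨c0, cs, rfl⟩ := List.exists_cons_of_ne_nil hc0
    have hhead : pvGet (c0 :: cs) 0 = c0 := by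
      simp [pvGet, PySem.List.pyGetD_zero_cons]
    have hhead' : pvGet (r :: rs) 0 = r := by
      simp [pvGet, PySem.List.pyGetD_zero_cons]
    have hlastR : pvGet (r :: rs) (-1) = (r :: rs).getLastD "" := by
      rw [pvGet, PySem.List.pyGetD_neg_one (r :: rs) "" (by simp)]
      simp [List.getLastD_eq_getLast?, List.getLast?_eq_some_getLast (by simp : r :: rs ≠ [])]
    have hlastC : pvGet (c0 :: cs) (-1) = (c0 :: cs).getLastD "" := by
      rw [pvGet, PySem.List.pyGetD_neg_one (c0 :: cs) "" (by simp)]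
      simp [List.getLastD_eq_getLast?, List.getLast?_eq_some_getLast (by simp : c0 :: cs ≠ [])]
    simp only [hhead, hhead', hlastR, hlastC, List.headD_cons, ne_eq, reduceCtorEq,
      not_false_eq_true, true_and]
    split_ifs with h1 h2 h2
    · exact good_len _ _ (good_scoreWord _ _ _ (good_scoreWord _ _ _ hgood0))
    · exact good_len _ _ (good_scoreWord _ _ _ hgood0)
    · exact good_len _ _ (good_scoreWord _ _ _ hgood0)
    · exact good_len _ _ hgood0
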